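-- pv_equiv track=rewrite | github.com/Yousefcheng/mizi | 3/28.py | add_num
-- ===== SOURCE A (Python) =====
-- def add_num(num):
--     if num==1:
--         return 1
--     else:
--         temp=''
--         for i in range(num-1):
--
--             temp=temp+'1'
--
--         temp=temp+'2'
--             # sum=sum+int(temp)
--             # temp=temp[0:-1]
--         return int(temp)
-- ===== SOURCE B (Python) =====
-- def add_num(num):
--     # closed form: repunit of max(num-1,0) ones, then append the digit 2
--     if num == 1:
--         return 1
--     ones = max(num - 1, 0)
--     return (10 ** ones - 1) // 9 * 10 + 2
-- ===== Notes on version B (the rewrite author's own statement) =====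
-- stated objective: faster
-- what changed: Replaces the per-digit string-building loop plus int() parse by a closed-form arithmetic formula: the repunit with max(num-1, 0) ones, shifted one decimal place, plus a final digit.
import Mathlib
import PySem

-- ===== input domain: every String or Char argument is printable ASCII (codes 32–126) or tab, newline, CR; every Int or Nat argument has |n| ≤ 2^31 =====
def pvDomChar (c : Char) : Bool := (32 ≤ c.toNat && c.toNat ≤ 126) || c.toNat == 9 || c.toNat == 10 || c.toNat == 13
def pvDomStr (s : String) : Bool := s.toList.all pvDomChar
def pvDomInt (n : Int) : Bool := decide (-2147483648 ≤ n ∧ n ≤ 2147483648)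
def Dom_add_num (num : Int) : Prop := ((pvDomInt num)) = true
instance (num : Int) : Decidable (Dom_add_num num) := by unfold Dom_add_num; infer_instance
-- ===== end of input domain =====

-- B replaces A's per-digit string-building loop and int() parse by the closed-form repunit formula (10^ones - 1)//9 * 10 + 2.


-- ===== PORT A =====
-- hand port of Python's int(s): exact for the only strings A ever builds (non-empty
-- sequences of decimal digits, no sign/whitespace/underscore), where int(s) is the
-- left fold accumulating 10*acc + digit-value
def pyIntOfDigits (cs : List Char) : Int :=
  Int.ofNat (cs.foldl (fun a c => 10 * a + (c.toNat - 48)) 0)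

def add_num (num : Int) : Int :=
  if num == 1 then 1
  else
    let temp : List Char :=
      (PySem.List.pyRange 0 (num - 1) 1).foldl (fun t _ => t ++ ['1']) []
    pyIntOfDigits (temp ++ ['2'])

-- ===== PORT B =====
def add_num_alt (num : Int) : Int :=
  if num == 1 then 1
  else
    let ones : Nat := (max (num - 1) 0).toNat
    PySem.Int.floordiv ((10 : Int) ^ ones - 1) 9 * 10 + 2

-- ===== PRECONDITION & SPEC =====
def Spec_add_num (num : Int) (out : Int) : Prop := out = add_num_alt num
instance (num : Int) (out : Int) : Decidable (Spec_add_num num out) := by unfold Spec_add_num; infer_instance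

-- ===== CLAIM (what is proved, stated in full; the proofs are below) =====
def Claim_equal_add_num : Prop := ∀ (num : Int), Dom_add_num num → Spec_add_num num (add_num num)

-- ===== LEMMAS AND PROOFS =====

-- the repunit 11…1 with n ones
def repOnes : Nat → Nat
  | 0 => 0
  | n + 1 => 10 * repOnes n + 1

theorem nine_mul_repOnes (n : Nat) : 9 * repOnes n + 1 = 10 ^ n := by
  induction n with
  | zero => simp [repOnes]
  | succ n ih => simp only [repOnes, pow_succ]; omega

theorem foldl_digits_replicate_one (n : Nat) (a : Nat) :
    (List.replicate n '1').foldl (fun a c => 10 * a + (c.toNat - 48)) a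
      = a * 10 ^ n + repOnes n := by
  induction n generalizing a with
  | zero => simp [repOnes]
  | succ n ih =>
    rw [List.replicate_succ, List.foldl_cons, ih]
    have h9 := nine_mul_repOnes n
    have hc : ('1'.toNat - 48) = 1 := by decide
    rw [hc]
    simp only [repOnes, pow_succ]
    ring_nf
    omega

theorem A_closed (n : Nat) :
    pyIntOfDigits (List.replicate n '1' ++ ['2']) = (repOnes n : Int) * 10 + 2 := by
  unfold pyIntOfDigits
  rw [List.foldl_append, foldl_digits_replicate_one]
  have hc : ('2'.toNat - 48) = 2 := by decide
  simp only [List.foldl_cons, List.foldl_nil, hc, zero_mul, zero_add,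
    Int.ofNat_eq_natCast]
  push_cast
  ring

theorem B_closed (n : Nat) :
    PySem.Int.floordiv ((10 : Int) ^ n - 1) 9 = (repOnes n : Int) := by
  have h9 := nine_mul_repOnes n
  have hx : (10 : Int) ^ n - 1 = 9 * (repOnes n : Int) := by
    zify at h9
    linarith
  rw [hx, PySem.Int.floordiv_eq_ediv_of_pos (by norm_num)]
  exact Int.mul_ediv_cancel_left _ (by norm_num)

-- ===== VERDICT (by name: the statement is the Claim_ definition above) =====
theorem add_num_spec : Claim_equal_add_num := by
  intro num _
  unfold Spec_add_num add_num add_num_alt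
  by_cases h1 : num = 1
  · simp [h1]
  · have hne : (num == 1) = false := by simp [h1]
    rw [hne]
    simp only [Bool.false_eq_true, if_false]
    rw [PySem.List.foldl_append_singleton_eq_map (f := fun _ => '1'), List.nil_append,
        List.map_const', PySem.List.length_pyRange_one]
    have hmax : (max (num - 1) 0).toNat = (num - 1 - 0).toNat := by omega
    rw [A_closed, ← hmax, B_closed]
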